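-- pv_equiv track=rewrite | github.com/jsoyer/cv-pipeline | scripts/ats-score.py | categorize_keyword
-- ===== SOURCE A (Python) =====
-- CATEGORY_HINTS = {
--     "Leadership": {"leadership", "management", "manager", "director", "vp",
--                    "executive", "mentor", "hire", "hiring", "coaching",
--                    "people", "culture", "talent", "headcount"},
--     "Sales & GTM": {"sales", "revenue", "pipeline", "quota", "deal", "enterprise",
--                     "meddpicc", "challenger", "selling", "account", "customer",
--                     "upsell", "cross-sell", "arr", "arr-growth", "nrr",
--                     "land-expand", "gtm", "go-to-market"},
--     "Technical": {"engineering", "architecture", "architect", "cloud", "saas",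
--                   "api", "platform", "data", "security", "cyber", "ai",
--                   "machine-learning", "infrastructure", "devops", "software"},
--     "Methodology": {"agile", "scrum", "okr", "kpi", "meddpicc",
--                     "value-selling", "poc", "pov", "rfp", "rfi"},
--     "Domain": {"compliance", "governance", "regulation", "gdpr", "dspm",
--                "insider-threat", "identity", "access", "encryption"},
-- }
--
-- def categorize_keyword(kw):
--     """Assign a keyword to a category."""
--     kw_words = set(kw.replace("-", " ").split())
--     best_cat = "Other"
--     best_overlap = 0
--     for cat, hints in CATEGORY_HINTS.items():
--         overlap = len(kw_words & hints)
--         if overlap > best_overlap: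
--             best_overlap = overlap
--             best_cat = cat
--     # Also check if the keyword itself is in hints
--     if best_overlap == 0:
--         for cat, hints in CATEGORY_HINTS.items():
--             if kw in hints or kw.replace(" ", "-") in hints:
--                 return cat
--     return best_cat
-- ===== SOURCE B (Python) =====
-- CATEGORY_HINTS = {
--     "Leadership": {"leadership", "management", "manager", "director", "vp",
--                    "executive", "mentor", "hire", "hiring", "coaching",
--                    "people", "culture", "talent", "headcount"},
--     "Sales & GTM": {"sales", "revenue", "pipeline", "quota", "deal", "enterprise",
--                     "meddpicc", "challenger", "selling", "account", "customer",
--                     "upsell", "cross-sell", "arr", "arr-growth", "nrr",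
--                     "land-expand", "gtm", "go-to-market"},
--     "Technical": {"engineering", "architecture", "architect", "cloud", "saas",
--                   "api", "platform", "data", "security", "cyber", "ai",
--                   "machine-learning", "infrastructure", "devops", "software"},
--     "Methodology": {"agile", "scrum", "okr", "kpi", "meddpicc",
--                     "value-selling", "poc", "pov", "rfp", "rfi"},
--     "Domain": {"compliance", "governance", "regulation", "gdpr", "dspm",
--                "insider-threat", "identity", "access", "encryption"},
-- }
--
-- # Reverse index: hint word -> categories containing it, in CATEGORY_HINTS order.
-- _CATS = list(CATEGORY_HINTS)
-- _INDEX = {}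
-- for _cat, _hints in CATEGORY_HINTS.items():
--     for _w in _hints:
--         _INDEX[_w] = _INDEX.get(_w, []) + [_cat]
--
--
-- def categorize_keyword(kw):
--     """Assign a keyword to a category."""
--     votes = {}
--     for w in set(kw.replace("-", " ").split()):
--         for cat in _INDEX.get(w, []):
--             votes[cat] = votes.get(cat, 0) + 1
--     best_cat = "Other"
--     best = 0
--     for cat in _CATS:
--         v = votes.get(cat, 0)
--         if v > best:
--             best = v
--             best_cat = cat
--     if best == 0:
--         hyph = kw.replace(" ", "-")
--         for cat, hints in CATEGORY_HINTS.items():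
--             if kw in hints or hyph in hints:
--                 return cat
--     return best_cat
-- ===== Notes on version B (the rewrite author's own statement) =====
-- stated objective: alternative
-- what changed: Replaces the per-category set intersections by a precomputed reverse index (hint word -> owning categories) plus per-category vote counters filled in one pass over the keyword's distinct words; the argmax scan and whole-string fallback then read the counters.
import Mathlib
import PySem

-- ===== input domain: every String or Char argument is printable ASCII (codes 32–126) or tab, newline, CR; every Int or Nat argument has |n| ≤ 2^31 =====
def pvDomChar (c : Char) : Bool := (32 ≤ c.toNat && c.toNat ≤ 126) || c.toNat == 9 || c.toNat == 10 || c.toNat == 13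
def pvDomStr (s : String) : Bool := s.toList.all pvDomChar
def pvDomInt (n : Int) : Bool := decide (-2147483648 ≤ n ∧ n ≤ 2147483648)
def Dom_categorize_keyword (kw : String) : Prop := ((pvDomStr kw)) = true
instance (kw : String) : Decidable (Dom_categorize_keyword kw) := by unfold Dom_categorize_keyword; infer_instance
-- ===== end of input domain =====

-- B replaces A's per-category set intersections by a precomputed reverse index (hint word -> owning
-- categories) and per-category vote counters filled in one pass over the keyword's words (objective:
-- alternative decomposition; counts, tie-break and the whole-string fallback are proved identical).

-- ===== PORT A =====
-- CATEGORY_HINTS: dict of python sets, insertion order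
def pvH1 : PySem.Set String := PySem.Set.ofList ["leadership", "management", "manager", "director",
  "vp", "executive", "mentor", "hire", "hiring", "coaching", "people", "culture", "talent", "headcount"]
def pvH2 : PySem.Set String := PySem.Set.ofList ["sales", "revenue", "pipeline", "quota", "deal",
  "enterprise", "meddpicc", "challenger", "selling", "account", "customer", "upsell", "cross-sell",
  "arr", "arr-growth", "nrr", "land-expand", "gtm", "go-to-market"]
def pvH3 : PySem.Set String := PySem.Set.ofList ["engineering", "architecture", "architect", "cloud",
  "saas", "api", "platform", "data", "security", "cyber", "ai", "machine-learning", "infrastructure",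
  "devops", "software"]
def pvH4 : PySem.Set String := PySem.Set.ofList ["agile", "scrum", "okr", "kpi", "meddpicc",
  "value-selling", "poc", "pov", "rfp", "rfi"]
def pvH5 : PySem.Set String := PySem.Set.ofList ["compliance", "governance", "regulation", "gdpr",
  "dspm", "insider-threat", "identity", "access", "encryption"]
def pvCategoryHints : List (String × PySem.Set String) :=
  [ ("Leadership", pvH1), ("Sales & GTM", pvH2), ("Technical", pvH3),
    ("Methodology", pvH4), ("Domain", pvH5) ]

-- the second loop of A: 'for cat, hints in CATEGORY_HINTS.items(): if kw in hints or kw.replace(" ","-") in hints: return cat'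
def pvFallbackA (kw : String) (dflt : String) : String :=
  match pvCategoryHints.find? (fun ch =>
      PySem.Set.contains ch.2 kw || PySem.Set.contains ch.2 (PySem.Str.replace kw " " "-")) with
  | some ch => ch.1
  | none => dflt

def categorize_keyword (kw : String) : String :=
  let kw_words : PySem.Set String :=
    PySem.Set.ofList (PySem.Str.split₀ (PySem.Str.replace kw "-" " "))
  let r := pvCategoryHints.foldl
    (fun (acc : String × Int) ch =>
      let overlap : Int := PySem.Set.len (PySem.Set.inter kw_words ch.2)
      if overlap > acc.2 then (ch.1, overlap) else acc)
    ("Other", 0)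
  if r.2 == 0 then pvFallbackA kw r.1 else r.1

-- ===== PORT B =====
-- _CATS = list(CATEGORY_HINTS)
def pvCats : List String := pvCategoryHints.map Prod.fst

-- _INDEX: for each category, for each hint word w: _INDEX[w] = _INDEX.get(w, []) + [cat]
def pvIndex : PySem.Dict String (List String) :=
  pvCategoryHints.foldl
    (fun d ch => ch.2.foldl (fun d w => PySem.Dict.modify d w [] (· ++ [ch.1])) d)
    PySem.Dict.empty

-- the final fallback loop of Source B: 'for cat, hints in CATEGORY_HINTS.items(): if kw in hints or hyph in hints: return cat', then 'return best_cat'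
def pvFallbackB (kw hyph dflt : String) : List (String × PySem.Set String) → String
  | [] => dflt
  | ch :: rest =>
    if PySem.Set.contains ch.2 kw || PySem.Set.contains ch.2 hyph then ch.1
    else pvFallbackB kw hyph dflt rest

-- the votes loop: for w in words: for cat in _INDEX.get(w, []): votes[cat] = votes.get(cat,0)+1
def pvVotes (ws : List String) : PySem.Dict String Int :=
  ws.foldl
    (fun v w => (PySem.Dict.getD pvIndex w []).foldl
      (fun v cat => PySem.Dict.modify v cat 0 (· + 1)) v)
    PySem.Dict.empty

def categorize_keyword_alt (kw : String) : String :=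
  let words : PySem.Set String :=
    PySem.Set.ofList (PySem.Str.split₀ (PySem.Str.replace kw "-" " "))
  let votes := pvVotes words
  let r := pvCats.foldl
    (fun (acc : String × Int) cat =>
      let v : Int := PySem.Dict.getD votes cat 0
      if v > acc.2 then (cat, v) else acc)
    ("Other", 0)
  if r.2 == 0 then
    let hyph := PySem.Str.replace kw " " "-"
    pvFallbackB kw hyph r.1 pvCategoryHints
  else r.1

-- ===== PRECONDITION & SPEC =====
def Spec_categorize_keyword (kw : String) (out : String) : Prop := out = categorize_keyword_alt kw
instance (kw : String) (out : String) : Decidable (Spec_categorize_keyword kw out) := by unfold Spec_categorize_keyword; infer_instance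

-- ===== CLAIM (what is proved, stated in full; the proofs are below) =====
def Claim_equal_categorize_keyword : Prop := ∀ (kw : String), Dom_categorize_keyword kw → Spec_categorize_keyword kw (categorize_keyword kw)

-- ===== LEMMAS AND PROOFS =====

-- building one category's hints into the index only appends that category to each hint's list
theorem pv_build_inner_count (cat : String) (hs : List String) (d : PySem.Dict String (List String))
    (w c : String) :
    ((hs.foldl (fun d w' => PySem.Dict.modify d w' [] (· ++ [cat])) d).getD w []).count c
      = ((d.getD w []).count c) + hs.count w * (if cat = c then 1 else 0) := by
  induction hs generalizing d with
  | nil => simp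
  | cons h t ih =>
    simp only [List.foldl_cons, ih, PySem.Dict.getD_modify, List.count_cons]
    by_cases hw : w = h
    · subst hw
      simp [List.count_append, List.count_singleton]
      split_ifs <;> simp_all
      ring
    · simp [hw, Ne.symm hw]

-- counting inside the vote dict: the inner fold is a counter
set_option maxRecDepth 8192 in
theorem pv_votes_getD (c : String) (W : List String) (v : PySem.Dict String Int) :
    (W.foldl
      (fun v w => (PySem.Dict.getD pvIndex w []).foldl
        (fun v cat => PySem.Dict.modify v cat 0 (· + 1)) v) v).getD c 0
      = v.getD c 0 + (W.map (fun w => (((PySem.Dict.getD pvIndex w []).count c : Int)))).sum := by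
  induction W generalizing v with
  | nil => simp
  | cons w t ih =>
    simp only [List.foldl_cons, ih, PySem.Dict.getD_foldl_modify_add_one, List.map_cons,
      List.sum_cons]
    ring

-- the reverse index is correct: for every word, its vote list holds category i exactly
-- (hints_i.count w) times
theorem pv_index_count (w c : String) :
    (PySem.Dict.getD pvIndex w []).count c
      = ((pvCategoryHints.map (fun ch => ch.2.count w * (if ch.1 = c then 1 else 0))).sum) := by
  show ((pvIndex).getD w []).count c = _
  unfold pvIndex
  simp only [pvCategoryHints, List.foldl_cons, List.foldl_nil, List.map_cons, List.map_nil,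
    List.sum_cons, List.sum_nil]
  rw [pv_build_inner_count, pv_build_inner_count, pv_build_inner_count, pv_build_inner_count,
    pv_build_inner_count]
  simp [PySem.Dict.getD_empty]
  ring

-- a nodup hint list counts a word 0/1, and summing the indicator over W is the filter length
theorem pv_sum_indicator (H : PySem.Set String) (hH : H.Nodup) (W : List String) :
    (W.map (fun w => ((H.count w : Int)))).sum = ((W.filter (fun x => H.contains x)).length : Int) := by
  induction W with
  | nil => simp
  | cons w t ih =>
    simp only [List.map_cons, List.sum_cons, ih, List.filter_cons]
    by_cases hw : w ∈ H
    · rw [List.count_eq_one_of_mem hH hw]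
      simp [PySem.Set.contains, hw]
      ring
    · rw [List.count_eq_zero_of_not_mem hw]
      simp [PySem.Set.contains, hw]

-- helper: overlap of A written as filter length
theorem pv_len_inter (W H : PySem.Set String) :
    PySem.Set.len (PySem.Set.inter W H) = ((W.filter (fun x => H.contains x)).length : Int) := by
  simp [PySem.Set.len, PySem.Set.inter]

-- per category c with hint set H: each vote counter equals A's overlap |W ∩ H|
theorem pv_vote_cat (c : String) (H : PySem.Set String) (hH : H.Nodup)
    (hidx : ∀ w, (PySem.Dict.getD pvIndex w []).count c = H.count w) (W : List String) :
    PySem.Dict.getD (pvVotes W) c 0 = PySem.Set.len (PySem.Set.inter W H) := by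
  unfold pvVotes
  rw [pv_votes_getD]
  simp only [hidx, PySem.Dict.getD_empty, zero_add]
  rw [pv_sum_indicator H hH, pv_len_inter]

theorem pv_cat1 (W : List String) :
    PySem.Dict.getD (pvVotes W) "Leadership" 0 = PySem.Set.len (PySem.Set.inter W pvH1) := by
  refine pv_vote_cat _ _ (by decide) (fun w => ?_) W
  rw [pv_index_count]; simp [pvCategoryHints, pvH1]

theorem pv_cat2 (W : List String) :
    PySem.Dict.getD (pvVotes W) "Sales & GTM" 0 = PySem.Set.len (PySem.Set.inter W pvH2) := by
  refine pv_vote_cat _ _ (by decide) (fun w => ?_) W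
  rw [pv_index_count]; simp [pvCategoryHints, pvH2]

theorem pv_cat3 (W : List String) :
    PySem.Dict.getD (pvVotes W) "Technical" 0 = PySem.Set.len (PySem.Set.inter W pvH3) := by
  refine pv_vote_cat _ _ (by decide) (fun w => ?_) W
  rw [pv_index_count]; simp [pvCategoryHints, pvH3]

theorem pv_cat4 (W : List String) :
    PySem.Dict.getD (pvVotes W) "Methodology" 0 = PySem.Set.len (PySem.Set.inter W pvH4) := by
  refine pv_vote_cat _ _ (by decide) (fun w => ?_) W
  rw [pv_index_count]; simp [pvCategoryHints, pvH4]

theorem pv_cat5 (W : List String) :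
    PySem.Dict.getD (pvVotes W) "Domain" 0 = PySem.Set.len (PySem.Set.inter W pvH5) := by
  refine pv_vote_cat _ _ (by decide) (fun w => ?_) W
  rw [pv_index_count]; simp [pvCategoryHints, pvH5]

-- the two fallback loops agree: first match by find? vs. loop with early return
theorem pv_fb_gen (kw dflt : String) (l : List (String × PySem.Set String)) :
    pvFallbackB kw (PySem.Str.replace kw " " "-") dflt l
      = (match l.find? (fun ch =>
            PySem.Set.contains ch.2 kw || PySem.Set.contains ch.2 (PySem.Str.replace kw " " "-")) with
         | some ch => ch.1
         | none => dflt) := by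
  induction l with
  | nil => simp [pvFallbackB]
  | cons ch rest ih =>
    rw [pvFallbackB, List.find?_cons]
    cases h : (PySem.Set.contains ch.2 kw || PySem.Set.contains ch.2 (PySem.Str.replace kw " " "-"))
    · simp [ih]
    · simp

theorem pv_fb (kw dflt : String) :
    pvFallbackB kw (PySem.Str.replace kw " " "-") dflt
        [ ("Leadership", pvH1), ("Sales & GTM", pvH2), ("Technical", pvH3),
          ("Methodology", pvH4), ("Domain", pvH5) ]
      = pvFallbackA kw dflt := by
  rw [pv_fb_gen]; rfl

-- ===== VERDICT (by name: the statement is the Claim_ definition above) =====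
theorem categorize_keyword_spec : Claim_equal_categorize_keyword := by
  intro kw _
  unfold Spec_categorize_keyword categorize_keyword categorize_keyword_alt
  simp only [pvCategoryHints, pvCats, List.map_cons, List.map_nil, List.foldl_cons,
    List.foldl_nil, pv_cat1, pv_cat2, pv_cat3, pv_cat4, pv_cat5, pv_fb]
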